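-- pv_equiv track=rewrite | github.com/amanabate/A2SV-Solutions | 22-Sep-2025/Smallest Value After Replacing With Sum of Prime Factors 395119.py | smallestValue
-- ===== SOURCE A (Python) =====
-- def smallestValue(n: int) -> int:
--     def prime_factor_sum(x):
--         s, d = 0, 2
--         temp = x
--         while d * d <= temp:
--             while temp % d == 0:
--                 s += d
--                 temp //= d
--             d += 1
--         if temp > 1:
--             s += temp
--         return s
--
--     prev = -1
--     while n != prev:
--         prev = n
--         n = prime_factor_sum(n)
--     return n
-- ===== SOURCE B (Python) =====
-- def smallestValue(n: int) -> int:
--     def spf(x):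
--         d = 2
--         while d * d <= x and x % d != 0:
--             d += 1
--         return d if d * d <= x else x
--
--     def factors(x):
--         if x <= 1:
--             return []
--         p = spf(x)
--         return [p] + factors(x // p)
--
--     m = sum(factors(n))
--     return n if m == n else smallestValue(m)
-- ===== Notes on version B (the rewrite author's own statement) =====
-- stated objective: alternative
-- what changed: B builds an explicit prime-factor list by recursive smallest-factor extraction (the divisor scan restarts at 2 for every factor) and sums it, and iterates to the fixpoint by top-level recursion, replacing A's resumed-divisor accumulator loops and sentinel-prev while loop; B also returns 0 on n = -1 where A's sentinel makes it return -1.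
-- intended difference: On n = -1 A's loop exits immediately because prev is initialised to the sentinel -1 and A returns -1; B returns 0, the iterated prime-factor-sum fixpoint it returns for every other n < 0, which is the intended value. — e.g. on smallestValue(-1): A returns -1, B returns 0
import Mathlib
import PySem

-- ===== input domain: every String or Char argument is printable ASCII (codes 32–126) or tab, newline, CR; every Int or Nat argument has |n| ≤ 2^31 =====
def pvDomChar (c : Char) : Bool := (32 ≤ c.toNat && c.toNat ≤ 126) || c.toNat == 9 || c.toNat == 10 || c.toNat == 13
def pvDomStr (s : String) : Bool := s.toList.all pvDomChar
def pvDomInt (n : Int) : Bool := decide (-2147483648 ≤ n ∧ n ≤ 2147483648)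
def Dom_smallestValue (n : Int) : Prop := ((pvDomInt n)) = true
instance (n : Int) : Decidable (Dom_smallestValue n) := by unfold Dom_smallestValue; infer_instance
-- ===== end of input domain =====

-- B replaces A's accumulator loops (resumed divisor, sentinel-prev while) by building an
-- explicit prime-factor list via recursive smallest-factor extraction and summing it, with a
-- recursive fixpoint (objective: alternative); on n = -1 A returns -1 (its 'prev = -1'
-- sentinel), B returns 0 like for every other n < 0.
-- Every `fuel` parameter below is a totality guard only: each fuel value is proved below to
-- cover the loop it guards, so the 0 branch is never the value of a reachable call.

-- ===== PORT A =====
-- the inner `while temp % d == 0` loop of prime_factor_sum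
def innerA (fuel : Nat) (s temp d : Int) : Int × Int :=
  match fuel with
  | 0 => (s, temp)
  | fuel + 1 =>
    if PySem.Int.mod temp d == 0 then innerA fuel (s + d) (PySem.Int.floordiv temp d) d
    else (s, temp)

-- the outer `while d * d <= temp` loop of prime_factor_sum, then `if temp > 1: s += temp`
def outerA (fuel : Nat) (s temp d : Int) : Int :=
  match fuel with
  | 0 => if 1 < temp then s + temp else s
  | fuel + 1 =>
    if d * d ≤ temp then
      outerA fuel (innerA (temp.toNat + 1) s temp d).1 (innerA (temp.toNat + 1) s temp d).2 (d + 1)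
    else if 1 < temp then s + temp else s

def primeFactorSum (x : Int) : Int := outerA (x.toNat + 2) 0 x 2

-- the outer `while n != prev` loop of smallestValue
def loopGo (fuel : Nat) (prev n : Int) : Int :=
  match fuel with
  | 0 => n
  | fuel + 1 => if n ≠ prev then loopGo fuel n (primeFactorSum n) else n

def smallestValue (n : Int) : Int := loopGo (n.toNat + 3) (-1) n

-- ===== PORT B =====
-- the `while d * d <= x and x % d != 0` scan of spf
def bScan (fuel : Nat) (x d : Int) : Int :=
  match fuel with
  | 0 => d
  | fuel + 1 => if d * d ≤ x ∧ PySem.Int.mod x d ≠ 0 then bScan fuel x (d + 1) else d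

-- spf(x): the scan's final d if d*d ≤ x still holds, else x itself
def bSpf (x : Int) : Int :=
  if bScan (x.toNat + 2) x 2 * bScan (x.toNat + 2) x 2 ≤ x then bScan (x.toNat + 2) x 2
  else x

-- factors(x): list of prime factors by recursive smallest-factor extraction
def bFactors (fuel : Nat) (x : Int) : List Int :=
  match fuel with
  | 0 => []
  | fuel + 1 =>
    if x ≤ 1 then [] else bSpf x :: bFactors fuel (PySem.Int.floordiv x (bSpf x))

-- m = sum(factors(n)); n if m == n else smallestValue(m)
def altGo (fuel : Nat) (n : Int) : Int :=
  match fuel with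
  | 0 => n
  | fuel + 1 =>
    if (bFactors (n.toNat + 1) n).sum = n then n
    else altGo fuel ((bFactors (n.toNat + 1) n).sum)

def smallestValue_alt (n : Int) : Int := altGo (n.toNat + 3) n

-- ===== PRECONDITION & SPEC =====
-- On n = -1, A's loop stops immediately because of the sentinel prev = -1 and A returns -1;
-- B returns 0 there, the iterated prime-factor-sum value it returns for every other n < 0.
def D_smallestValue (n : Int) : Prop := n = -1
instance (n : Int) : Decidable (D_smallestValue n) := by unfold D_smallestValue; infer_instance

def Spec_smallestValue (n : Int) (out : Int) : Prop := ¬ D_smallestValue n → out = smallestValue_alt n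
instance (n : Int) (out : Int) : Decidable (Spec_smallestValue n out) := by unfold Spec_smallestValue; infer_instance

def pvDiffWitness_smallestValue : Int := -1
def pvDiffWitnessOut_smallestValue : Int × Int := (-1, 0)

-- ===== CLAIM (what is proved, stated in full; the proofs are below) =====
def Claim_unchanged_smallestValue : Prop := ∀ (n : Int), Dom_smallestValue n → Spec_smallestValue n (smallestValue n)
def Claim_changed_smallestValue : Prop := Dom_smallestValue (pvDiffWitness_smallestValue) ∧ D_smallestValue (pvDiffWitness_smallestValue) ∧ smallestValue (pvDiffWitness_smallestValue) = pvDiffWitnessOut_smallestValue.1 ∧ smallestValue_alt (pvDiffWitness_smallestValue) = pvDiffWitnessOut_smallestValue.2 ∧ pvDiffWitnessOut_smallestValue.1 ≠ pvDiffWitnessOut_smallestValue.2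
def Claim_exact_smallestValue : Prop := ∀ (n : Int), Dom_smallestValue n → D_smallestValue n → smallestValue n ≠ smallestValue_alt n

-- ===== LEMMAS AND PROOFS =====

theorem bScan_ge (fuel : Nat) : ∀ (x d : Int), d ≤ bScan fuel x d := by
  induction fuel with
  | zero => intro x d; rw [bScan]
  | succ fuel ih =>
      intro x d
      rw [bScan]
      split_ifs with h
      · have := ih x (d + 1)
        omega
      · omega

theorem bSpf_two_le (x : Int) (hx : 2 ≤ x) : 2 ≤ bSpf x := by
  unfold bSpf
  have := bScan_ge (x.toNat + 2) x 2
  split_ifs <;> omega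

-- the fuel-free reference value: sum of prime factors by least-factor extraction
def sopfr (x : Int) : Int :=
  if h : x ≤ 1 then 0 else bSpf x + sopfr (x / bSpf x)
termination_by x.toNat
decreasing_by
  have hp : 2 ≤ bSpf x := bSpf_two_le x (by omega)
  have h1 : x / bSpf x < x := by
    rw [Int.ediv_lt_iff_lt_mul (by omega)]
    nlinarith
  have h0 : 0 ≤ x / bSpf x := Int.ediv_nonneg (by omega) (by omega)
  omega

theorem sopfr_small (x : Int) (h : x ≤ 1) : sopfr x = 0 := by
  rw [sopfr, dif_pos h]

theorem sopfr_step (x : Int) (h : ¬ x ≤ 1) : sopfr x = bSpf x + sopfr (x / bSpf x) := by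
  conv_lhs => rw [sopfr]
  rw [dif_neg h]

theorem bScan_exit (fuel : Nat) : ∀ (x d : Int), 2 ≤ d → x.toNat + 2 ≤ fuel + d.toNat →
    (bScan fuel x d * bScan fuel x d ≤ x → PySem.Int.mod x (bScan fuel x d) = 0) := by
  induction fuel with
  | zero =>
      intro x d h2 hb hdd
      rw [bScan] at hdd
      have hdx : x < d := by omega
      nlinarith
  | succ fuel ih =>
      intro x d h2 hb
      rw [bScan]
      split_ifs with h
      · exact ih x (d + 1) (by omega) (by omega)
      · intro hdd
        rcases not_and_or.mp h with hc | hc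
        · exact absurd hdd hc
        · simpa using hc

theorem bSpf_dvd (x : Int) (hx : 1 ≤ x) : bSpf x ∣ x := by
  unfold bSpf
  split_ifs with hdd
  · exact (PySem.Int.mod_eq_zero_iff_dvd x _).mp
      (bScan_exit (x.toNat + 2) x 2 (by omega) (by omega) hdd)
  · exact dvd_rfl

-- bounds on sopfr, used by iterFix's termination and the round-count bound
theorem sopfr_bounds (x : Int) (hx : 2 ≤ x) : 2 ≤ sopfr x ∧ sopfr x ≤ x := by
  induction x using sopfr.induct with
  | case1 x h => omega
  | case2 x h ih =>
      have hp2 : 2 ≤ bSpf x := bSpf_two_le x (by omega)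
      have hpd : bSpf x ∣ x := bSpf_dvd x (by omega)
      have hmul : bSpf x * (x / bSpf x) = x := Int.mul_ediv_cancel' hpd
      have hple : bSpf x ≤ x := Int.le_of_dvd (by omega) hpd
      have hq1 : 1 ≤ x / bSpf x := by
        rw [Int.le_ediv_iff_mul_le (by omega)]; simpa using hple
      rw [sopfr_step x h]
      by_cases h2q : 2 ≤ x / bSpf x
      · have := ih h2q
        constructor
        · omega
        · nlinarith [this.2]
      · have hq1' : x / bSpf x = 1 := by omega
        rw [hq1', sopfr_small 1 le_rfl]
        rw [hq1', mul_one] at hmul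
        omega

-- sum(factors(x)) computes sopfr whenever the fuel covers the extraction depth
theorem bFactors_sum_eq (fuel : Nat) : ∀ (x : Int), x.toNat < fuel →
    (bFactors fuel x).sum = sopfr x := by
  induction fuel with
  | zero => intro x hx; omega
  | succ fuel ih =>
      intro x hx
      rw [bFactors]
      split_ifs with h
      · rw [sopfr_small x h]; rfl
      · have hp2 : 2 ≤ bSpf x := bSpf_two_le x (by omega)
        have hfd : PySem.Int.floordiv x (bSpf x) = x / bSpf x :=
          PySem.Int.floordiv_eq_ediv_of_pos (by omega)
        have hlt : x / bSpf x < x := by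
          rw [Int.ediv_lt_iff_lt_mul (by omega)]
          nlinarith
        have h0 : 0 ≤ x / bSpf x := Int.ediv_nonneg (by omega) (by omega)
        rw [List.sum_cons, hfd, ih (x / bSpf x) (by omega), sopfr_step x h]

-- if x is NOT divisible by any k with 2 ≤ k < p, p ∣ x and x < p*p, then x = p
theorem cofactor_eq (p x : Int) (hp2 : 2 ≤ p) (hx : 1 ≤ x) (hdvd : p ∣ x)
    (hmin : ∀ k, 2 ≤ k → k < p → ¬ k ∣ x) (hgt : x < p * p) : x = p := by
  have hpx : p ≤ x := Int.le_of_dvd (by omega) hdvd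
  have hq : p * (x / p) = x := Int.mul_ediv_cancel' hdvd
  have hq1 : 1 ≤ x / p := by
    rw [Int.le_ediv_iff_mul_le (by omega)]; simpa using hpx
  have hqlt : x / p < p := by
    rw [Int.ediv_lt_iff_lt_mul (by omega)]; exact hgt
  by_cases h2q : 2 ≤ x / p
  · exact absurd (Dvd.intro_left p hq) (hmin _ h2q hqlt)
  · have hq1' : x / p = 1 := by omega
    rw [hq1', mul_one] at hq; omega

-- the scan finds the least divisor p ≥ 2 of x (when one is characterised by the hypotheses)
theorem bScan_eq_of (p x : Int) (hp2 : 2 ≤ p) (hx : 1 ≤ x) (hdvd : p ∣ x)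
    (hmin : ∀ k, 2 ≤ k → k < p → ¬ k ∣ x) :
    ∀ (fuel : Nat) (c : Int), 2 ≤ c → c ≤ p → x.toNat + 2 ≤ fuel + c.toNat →
    (if bScan fuel x c * bScan fuel x c ≤ x then bScan fuel x c else x) = p := by
  intro fuel
  induction fuel with
  | zero =>
      intro c h2 hcp hb
      have hpx : p ≤ x := Int.le_of_dvd (by omega) hdvd
      omega
  | succ fuel ih =>
      intro c h2 hcp hb
      rw [bScan]
      split_ifs with h hdd hdd
      · -- guard true: c*c ≤ x and x % c ≠ 0, so c ∤ x and c ≠ p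
        have hnd : ¬ c ∣ x := fun hcd =>
          h.2 (by simpa using (PySem.Int.mod_eq_zero_iff_dvd x c).mpr hcd)
        have hne : c ≠ p := fun he => hnd (he ▸ hdvd)
        have := ih (c + 1) (by omega) (by omega) (by omega)
        rw [if_pos hdd] at this
        exact this
      · have hnd : ¬ c ∣ x := fun hcd =>
          h.2 (by simpa using (PySem.Int.mod_eq_zero_iff_dvd x c).mpr hcd)
        have hne : c ≠ p := fun he => hnd (he ▸ hdvd)
        have := ih (c + 1) (by omega) (by omega) (by omega)
        rw [if_neg hdd] at this
        exact this
      · -- guard false, c*c ≤ x: then x % c = 0, so c ∣ x, hence c = p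
        have hcd : c ∣ x := by
          rcases not_and_or.mp h with hc | hc
          · exact absurd hdd hc
          · exact (PySem.Int.mod_eq_zero_iff_dvd x c).mp (by simpa using hc)
        have hcpe : c = p := by
          by_contra hne
          exact hmin c h2 (lt_of_le_of_ne hcp hne) hcd
        exact hcpe
      · -- guard false, c*c > x: no divisor below c ≤ p, x < c*c ≤ p*p, so x = p
        have hxcc : x < c * c := by omega
        have hxpp : x < p * p := lt_of_lt_of_le hxcc (by nlinarith)
        exact cofactor_eq p x hp2 hx hdvd hmin hxpp

theorem bSpf_eq (p x : Int) (hp2 : 2 ≤ p) (hx : 1 ≤ x) (hdvd : p ∣ x)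
    (hmin : ∀ k, 2 ≤ k → k < p → ¬ k ∣ x) : bSpf x = p := by
  unfold bSpf
  exact bScan_eq_of p x hp2 hx hdvd hmin (x.toNat + 2) 2 (by omega) (by omega) (by omega)

-- A's inner loop agrees with sopfr, with invariants
theorem inner_eq (fuel : Nat) : ∀ (s temp d : Int), 2 ≤ d → 1 ≤ temp → temp.toNat < fuel →
    (∀ k, 2 ≤ k → k < d → ¬ k ∣ temp) →
    (innerA fuel s temp d).1 + sopfr (innerA fuel s temp d).2 = s + sopfr temp ∧
    1 ≤ (innerA fuel s temp d).2 ∧ (innerA fuel s temp d).2 ≤ temp ∧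
    (∀ k, 2 ≤ k → k ≤ d → ¬ k ∣ (innerA fuel s temp d).2) := by
  induction fuel with
  | zero => intro s temp d h2 h1 hf hinv; omega
  | succ fuel ih =>
      intro s temp d h2 h1 hf hinv
      rw [innerA]
      split_ifs with h
      · have hd : d ∣ temp := (PySem.Int.mod_eq_zero_iff_dvd temp d).mp (by simpa using h)
        have hfd : PySem.Int.floordiv temp d = temp / d :=
          PySem.Int.floordiv_eq_ediv_of_pos (by omega)
        have hdt : d ≤ temp := Int.le_of_dvd (by omega) hd
        have hmul : d * (temp / d) = temp := Int.mul_ediv_cancel' hd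
        have ht1 : 1 ≤ temp / d := by
          rw [Int.le_ediv_iff_mul_le (by omega)]; simpa using hdt
        have htlt : temp / d < temp := by
          rw [Int.ediv_lt_iff_lt_mul (by omega)]
          nlinarith
        have hinv1 : ∀ k, 2 ≤ k → k < d → ¬ k ∣ (temp / d) := by
          intro k hk2 hkd hkdvd
          exact hinv k hk2 hkd (hkdvd.trans (Dvd.intro_left d hmul))
        obtain ⟨e1, e2, e3, e4⟩ := ih (s + d) (temp / d) d h2 ht1 (by omega) hinv1
        have hspf : bSpf temp = d := bSpf_eq d temp h2 (by omega) hd hinv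
        have hstep : sopfr temp = d + sopfr (temp / d) := by
          rw [sopfr_step temp (by omega), hspf]
        rw [hfd]
        refine ⟨?_, e2, by omega, e4⟩
        rw [hstep]
        linarith [e1]
      · refine ⟨rfl, h1, le_refl _, ?_⟩
        intro k hk2 hkd hkdvd
        rcases lt_or_eq_of_le hkd with hlt | heq
        · exact hinv k hk2 hlt hkdvd
        · subst heq
          exact h (by simpa using (PySem.Int.mod_eq_zero_iff_dvd temp k).mpr hkdvd)

-- the value of A's loop exit expression once no divisor reaches d and d*d > temp
theorem exit_eq (s temp d : Int) (h2 : 2 ≤ d) (h1 : 1 ≤ temp) (hgt : temp < d * d)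
    (hinv : ∀ k, 2 ≤ k → k < d → ¬ k ∣ temp) :
    (if 1 < temp then s + temp else s) = s + sopfr temp := by
  by_cases ht : 1 < temp
  · rw [if_pos ht]
    have hmin : ∀ k, 2 ≤ k → k < temp → ¬ k ∣ temp := by
      intro k hk2 hkt hkdvd
      by_cases hkd : k < d
      · exact hinv k hk2 hkd hkdvd
      · have hkd' : d ≤ k := by omega
        have hmul : k * (temp / k) = temp := Int.mul_ediv_cancel' hkdvd
        have hkle : k ≤ temp := Int.le_of_dvd (by omega) hkdvd
        have hq1 : 1 ≤ temp / k := by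
          rw [Int.le_ediv_iff_mul_le (by omega)]; simpa using hkle
        have hqd : temp / k < d := by
          by_contra hc
          have hc' : d ≤ temp / k := by omega
          nlinarith
        by_cases hq2 : 2 ≤ temp / k
        · exact hinv _ hq2 hqd (Dvd.intro_left k hmul)
        · have hq1' : temp / k = 1 := by omega
          rw [hq1', mul_one] at hmul
          omega
    have hspf : bSpf temp = temp := bSpf_eq temp temp (by omega) (by omega) dvd_rfl hmin
    rw [sopfr_step temp (by omega), hspf, Int.ediv_self (by omega), sopfr_small 1 le_rfl]
    ring
  · rw [if_neg ht, sopfr_small temp (by omega)]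
    ring

-- A's outer loop agrees with sopfr whenever the fuel covers the remaining divisor range
theorem outer_eq (fuel : Nat) : ∀ (s temp d : Int), 2 ≤ d → 1 ≤ temp →
    temp.toNat + 2 ≤ fuel + d.toNat → (∀ k, 2 ≤ k → k < d → ¬ k ∣ temp) →
    outerA fuel s temp d = s + sopfr temp := by
  induction fuel with
  | zero =>
      intro s temp d h2 h1 hb hinv
      rw [outerA]
      have hdt : temp < d := by omega
      exact exit_eq s temp d h2 h1 (by nlinarith) hinv
  | succ fuel ih =>
      intro s temp d h2 h1 hb hinv
      rw [outerA]
      by_cases h : d * d ≤ temp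
      · rw [if_pos h]
        obtain ⟨e1, e2, e3, e4⟩ :=
          inner_eq (temp.toNat + 1) s temp d h2 h1 (by omega) hinv
        rw [ih _ _ (d + 1) (by omega) e2 (by omega) (fun k hk2 hkd => e4 k hk2 (by omega))]
        linarith [e1]
      · rw [if_neg h]
        exact exit_eq s temp d h2 h1 (by omega) hinv

-- prime_factor_sum(n) = sopfr n for every n
theorem fA_eq (n : Int) : primeFactorSum n = sopfr n := by
  by_cases h2 : 2 ≤ n
  · have := outer_eq (n.toNat + 2) 0 n 2 (by omega) (by omega) (by omega)
      (fun k hk2 hkl _ => by omega)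
    simpa [primeFactorSum] using this
  · have hf : n.toNat + 2 = (n.toNat + 1) + 1 := by omega
    show outerA (n.toNat + 2) 0 n 2 = sopfr n
    rw [hf, outerA, if_neg (by omega), if_neg (by omega), sopfr_small n (by omega)]

-- sum(factors(n)) at the fuel the port uses is sopfr n
theorem fB_eq (n : Int) : (bFactors (n.toNat + 1) n).sum = sopfr n :=
  bFactors_sum_eq (n.toNat + 1) n (by omega)

-- the common mathematical fixpoint both fueled loops reach
def iterFix (n : Int) : Int :=
  if sopfr n = n then n else iterFix (sopfr n)
termination_by (if 2 ≤ n then n.toNat + 3 else if n = 0 then 0 else 1 : Nat)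
decreasing_by
  rename_i hne
  by_cases h2 : 2 ≤ n
  · have hb := sopfr_bounds n h2
    split_ifs <;> omega
  · have hb0 : sopfr n = 0 := sopfr_small n (by omega)
    split_ifs <;> omega

theorem iterFix_self (n : Int) (h : sopfr n = n) : iterFix n = n := by
  rw [iterFix, if_pos h]

-- an upper bound on the number of rounds the fixpoint iteration still needs from n
def muFix (n : Int) : Nat := if 2 ≤ n then n.toNat + 2 else if n = 0 then 1 else 2

theorem muFix_pos (n : Int) : 1 ≤ muFix n := by
  unfold muFix; split_ifs <;> omega

theorem muFix_step (n : Int) (hne : sopfr n ≠ n) : muFix (sopfr n) < muFix n := by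
  by_cases h2 : 2 ≤ n
  · have hb := sopfr_bounds n h2
    unfold muFix
    split_ifs <;> omega
  · have hb0 : sopfr n = 0 := sopfr_small n (by omega)
    have hn0 : n ≠ 0 := fun he => hne (hb0.trans he.symm)
    unfold muFix
    rw [hb0]
    split_ifs <;> omega

theorem muFix_le (n : Int) : muFix n ≤ n.toNat + 3 := by
  unfold muFix; split_ifs <;> omega

-- the fueled loop of A reaches iterFix whenever the fuel covers the round bound
theorem loopGo_eq (k : Nat) : ∀ (prev n : Int), muFix n ≤ k →
    (prev = n → sopfr n = n) → loopGo k prev n = iterFix n := by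
  induction k with
  | zero =>
      intro prev n hk hp
      have := muFix_pos n
      omega
  | succ k ih =>
      intro prev n hk hp
      by_cases hnp : n = prev
      · rw [loopGo, if_neg (not_not_intro hnp), iterFix_self n (hp hnp.symm)]
      · rw [loopGo, if_pos hnp, fA_eq]
        by_cases hfix : sopfr n = n
        · rw [hfix]
          cases k with
          | zero => rw [loopGo, iterFix_self n hfix]
          | succ k => rw [loopGo, if_neg (not_not_intro rfl), iterFix_self n hfix]
        · have hlt := muFix_step n hfix
          rw [ih n (sopfr n) (by omega) (fun he => absurd he.symm hfix)]
          conv_rhs => rw [iterFix, if_neg hfix]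

-- the fueled recursion of B reaches iterFix whenever the fuel covers the round bound
theorem altGo_eq (k : Nat) : ∀ (n : Int), muFix n ≤ k → altGo k n = iterFix n := by
  induction k with
  | zero =>
      intro n hk
      have := muFix_pos n
      omega
  | succ k ih =>
      intro n hk
      rw [altGo, fB_eq]
      by_cases hfix : sopfr n = n
      · rw [if_pos hfix, iterFix_self n hfix]
      · have hlt := muFix_step n hfix
        rw [if_neg hfix, ih (sopfr n) (by omega)]
        conv_rhs => rw [iterFix, if_neg hfix]

-- ===== VERDICT (by name: the statement is the Claim_ definition above) =====
theorem smallestValue_spec : Claim_unchanged_smallestValue := by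
  intro n _ hD
  show loopGo (n.toNat + 3) (-1) n = altGo (n.toNat + 3) n
  rw [loopGo_eq (n.toNat + 3) (-1) n (muFix_le n) (fun h => absurd h.symm hD),
    altGo_eq (n.toNat + 3) n (muFix_le n)]

theorem smallestValue_changed : Claim_changed_smallestValue := by
  unfold Claim_changed_smallestValue
  decide

theorem smallestValue_tight : Claim_exact_smallestValue := by
  intro n _ hD
  have hn : n = -1 := hD
  subst hn
  decide
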